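-- pv_equiv track=rewrite | github.com/ner001/P2M | scrapping/linkedin_github.py | fully_encode_url
-- ===== SOURCE A (Python) =====
-- def fully_encode_url(url):
--     """Fully encode a URL for the API request"""
--     replacements = {
--         '://': '%3A%2F%2F',
--         '/': '%2F',
--         ':': '%3A',
--         '?': '%3F',
--         '=': '%3D',
--         '&': '%26',
--         ' ': '%20'
--     }
--     for char, encoded in replacements.items():
--         url = url.replace(char, encoded)
--     return url
-- ===== SOURCE B (Python) =====
-- import re
--
-- _MAPPING = {
--     '://': '%3A%2F%2F',
--     '/': '%2F',
--     ':': '%3A',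
--     '?': '%3F',
--     '=': '%3D',
--     '&': '%26',
--     ' ': '%20',
-- }
-- # '://' listed first so the unit encoding wins over the single-char alternatives,
-- # matching A's ordering priority in a single left-to-right pass.
-- _PATTERN = re.compile(r'://|[/:?=& ]')
--
-- def fully_encode_url(url):
--     """Fully encode a URL for the API request"""
--     return _PATTERN.sub(lambda m: _MAPPING[m.group()], url)
-- ===== Notes on version B (the rewrite author's own statement) =====
-- stated objective: idiomatic
-- what changed: Replaces A's seven sequential whole-string str.replace passes with one precompiled regex ('://' first in the alternation, then a character class) substituted in a single left-to-right pass.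
import Mathlib
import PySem

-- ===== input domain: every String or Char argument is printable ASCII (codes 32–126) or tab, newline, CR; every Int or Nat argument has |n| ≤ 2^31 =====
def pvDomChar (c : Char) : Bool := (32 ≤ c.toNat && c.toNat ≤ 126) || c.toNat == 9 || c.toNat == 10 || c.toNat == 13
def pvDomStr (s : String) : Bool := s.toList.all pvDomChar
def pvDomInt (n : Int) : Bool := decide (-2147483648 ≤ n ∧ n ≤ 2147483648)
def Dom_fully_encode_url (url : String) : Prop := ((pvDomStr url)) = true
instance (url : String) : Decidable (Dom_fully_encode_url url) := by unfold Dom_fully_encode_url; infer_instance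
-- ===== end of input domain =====

-- B replaces A's seven sequential whole-string replace passes by one compiled-regex
-- left-to-right pass ('://' first in the alternation); objective: idiomatic/alternative.

-- ===== PORT A =====
-- seven sequential str.replace passes, in the dict's insertion order
def fully_encode_url (url : String) : String :=
  let u := PySem.Str.replace url "://" "%3A%2F%2F"
  let u := PySem.Str.replace u "/" "%2F"
  let u := PySem.Str.replace u ":" "%3A"
  let u := PySem.Str.replace u "?" "%3F"
  let u := PySem.Str.replace u "=" "%3D"
  let u := PySem.Str.replace u "&" "%26"
  let u := PySem.Str.replace u " " "%20"
  u

-- ===== PORT B =====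
-- the single-char branch of the regex alternation: the character class [/:?=& ]
def pvEncChar (c : Char) : List Char :=
  if c = '/' then "%2F".toList
  else if c = ':' then "%3A".toList
  else if c = '?' then "%3F".toList
  else if c = '=' then "%3D".toList
  else if c = '&' then "%26".toList
  else if c = ' ' then "%20".toList
  else [c]

-- re.sub with pattern '://|[/:?=& ]': one left-to-right non-overlapping pass,
-- the '://' alternative tried first at each position (regex alternation priority)
def pvSub : List Char → List Char
  | ':' :: '/' :: '/' :: t => "%3A%2F%2F".toList ++ pvSub t
  | c :: t => pvEncChar c ++ pvSub t
  | [] => []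

def fully_encode_url_alt (url : String) : String :=
  String.ofList (pvSub url.toList)

-- ===== PRECONDITION & SPEC =====
def Spec_fully_encode_url (url : String) (out : String) : Prop := out = fully_encode_url_alt url
instance (url : String) (out : String) : Decidable (Spec_fully_encode_url url out) := by unfold Spec_fully_encode_url; infer_instance

-- ===== CLAIM (what is proved, stated in full; the proofs are below) =====
def Claim_equal_fully_encode_url : Prop := ∀ (url : String), Dom_fully_encode_url url → Spec_fully_encode_url url (fully_encode_url url)

-- ===== LEMMAS AND PROOFS =====

-- single-character replace as a flatMap
def pvRepc (c : Char) (r : List Char) (s : List Char) : List Char :=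
  s.flatMap (fun x => if x = c then r else [x])

lemma pvRepc_append (c : Char) (r a b : List Char) :
    pvRepc c r (a ++ b) = pvRepc c r a ++ pvRepc c r b := by
  simp [pvRepc]

lemma go_single (c : Char) (r : List Char) :
    ∀ (l : List Char) (fuel : Nat) (acc : List Char), l.length ≤ fuel →
      PySem.Chars.replace.go [c] r fuel l acc = acc.reverse ++ pvRepc c r l := by
  intro l
  induction l with
  | nil =>
    intro fuel acc _
    cases fuel <;> simp [PySem.Chars.replace.go, pvRepc]
  | cons x t ih =>
    intro fuel acc h
    cases fuel with
    | zero => simp at h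
    | succ n =>
      by_cases hx : x = c
      · subst hx
        rw [PySem.Chars.replace.go]
        simp only [List.isPrefixOf, BEq.rfl, Bool.true_and, if_true,
          List.length_cons, List.length_nil, Nat.zero_add, List.drop_succ_cons, List.drop_zero]
        rw [ih n (r.reverse ++ acc) (Nat.le_of_succ_le_succ h)]
        simp [pvRepc]
      · rw [PySem.Chars.replace.go]
        have : ([c].isPrefixOf (x :: t)) = false := by
          simp [List.isPrefixOf]; exact fun h' => absurd h'.symm hx
        rw [this]
        simp only [Bool.false_eq_true, if_false]
        rw [ih n (x :: acc) (Nat.le_of_succ_le_succ h)]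
        simp [pvRepc, hx]

lemma replace_single (c : Char) (r s : List Char) :
    PySem.Chars.replace s [c] r = pvRepc c r s := by
  rw [PySem.Chars.replace]
  simp [go_single c r s s.length [] (le_refl _)]

-- replacing "://" by "%3A%2F%2F" is the three-char scan
def pvScan3 : List Char → List Char
  | ':' :: '/' :: '/' :: t => "%3A%2F%2F".toList ++ pvScan3 t
  | c :: t => c :: pvScan3 t
  | [] => []

lemma go_337 :
    ∀ (fuel : Nat) (l acc : List Char), l.length ≤ fuel →
      PySem.Chars.replace.go [':', '/', '/'] "%3A%2F%2F".toList fuel l acc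
        = acc.reverse ++ pvScan3 l := by
  intro fuel
  induction fuel with
  | zero =>
    intro l acc h
    have hl : l = [] := List.eq_nil_of_length_eq_zero (Nat.le_zero.mp h)
    subst hl
    simp [PySem.Chars.replace.go, pvScan3]
  | succ n ih =>
    intro l acc h
    rcases l with _ | ⟨c, t⟩
    · simp [PySem.Chars.replace.go, pvScan3]
    · rw [PySem.Chars.replace.go]
      by_cases hp : ([':', '/', '/'].isPrefixOf (c :: t)) = true
      · obtain ⟨t', ht⟩ := (List.isPrefixOf_iff_prefix.mp hp)
        simp only [List.cons_append, List.nil_append] at ht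
        obtain ⟨rfl, rfl⟩ : c = ':' ∧ t = '/' :: '/' :: t' := by
          injection ht with h1 h2; exact ⟨h1.symm, h2.symm⟩
        simp only [hp, if_true, List.length_cons, List.length_nil, List.drop_succ_cons, List.drop_zero]
        rw [ih t' _ (by simp at h ⊢; omega)]
        simp [pvScan3]
      · simp only [hp, Bool.false_eq_true, if_false]
        rw [ih t (c :: acc) (Nat.le_of_succ_le_succ h)]
        have hs : pvScan3 (c :: t) = c :: pvScan3 t := by
          rw [pvScan3.eq_def]
          split
          · rename_i heq
            exact absurd (by rw [heq]; simp [List.isPrefixOf]) hp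
          all_goals simp_all
        simp [hs]

lemma replace_337 (s : List Char) :
    PySem.Chars.replace s [':', '/', '/'] "%3A%2F%2F".toList = pvScan3 s := by
  rw [PySem.Chars.replace]
  have := go_337 s.length s [] (le_refl _)
  simp at this ⊢
  exact this

def pvFlat6 (s : List Char) : List Char :=
  pvRepc ' ' "%20".toList (pvRepc '&' "%26".toList (pvRepc '=' "%3D".toList
    (pvRepc '?' "%3F".toList (pvRepc ':' "%3A".toList (pvRepc '/' "%2F".toList s)))))

lemma pvFlat6_append (a b : List Char) : pvFlat6 (a ++ b) = pvFlat6 a ++ pvFlat6 b := by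
  simp [pvFlat6, pvRepc_append]

lemma pvFlat6_single (c : Char) : pvFlat6 [c] = pvEncChar c := by
  by_cases h1 : c = '/'
  · subst h1; rfl
  by_cases h2 : c = ':'
  · subst h2; rfl
  by_cases h3 : c = '?'
  · subst h3; rfl
  by_cases h4 : c = '='
  · subst h4; rfl
  by_cases h5 : c = '&'
  · subst h5; rfl
  by_cases h6 : c = ' '
  · subst h6; rfl
  simp [pvFlat6, pvRepc, pvEncChar, h1, h2, h3, h4, h5, h6]

lemma pvFlat6_scan3 (l : List Char) : pvFlat6 (pvScan3 l) = pvSub l := by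
  induction l using pvScan3.induct with
  | case1 t ih =>
    rw [show pvScan3 (':' :: '/' :: '/' :: t) = "%3A%2F%2F".toList ++ pvScan3 t from rfl,
        pvFlat6_append, ih]
    rfl
  | case2 c t hne ih =>
    have hs : pvScan3 (c :: t) = c :: pvScan3 t := by
      rw [pvScan3.eq_def]
      split
      · rename_i heq
        injection heq with e1 e2
        exact (hne _ e1 e2).elim
      all_goals simp_all
    have hb : pvSub (c :: t) = pvEncChar c ++ pvSub t := by
      rw [pvSub.eq_def]
      split
      · rename_i heq
        injection heq with e1 e2
        exact (hne _ e1 e2).elim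
      all_goals simp_all
    rw [hs, hb, show (c :: pvScan3 t) = [c] ++ pvScan3 t from rfl, pvFlat6_append,
        pvFlat6_single, ih]
  | case3 => rfl

-- ===== VERDICT (by name: the statement is the Claim_ definition above) =====
theorem fully_encode_url_spec : Claim_equal_fully_encode_url := by
  intro url _
  unfold Spec_fully_encode_url fully_encode_url fully_encode_url_alt
  apply String.toList_injective
  simp only [PySem.Str.toList_replace]
  rw [show ("://" : String).toList = [':', '/', '/'] from rfl, replace_337]
  rw [show ("/" : String).toList = ['/'] from rfl, replace_single]
  rw [show (":" : String).toList = [':'] from rfl, replace_single]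
  rw [show ("?" : String).toList = ['?'] from rfl, replace_single]
  rw [show ("=" : String).toList = ['='] from rfl, replace_single]
  rw [show ("&" : String).toList = ['&'] from rfl, replace_single]
  rw [show (" " : String).toList = [' '] from rfl, replace_single]
  show pvFlat6 (pvScan3 url.toList) = (String.ofList (pvSub url.toList)).toList
  rw [pvFlat6_scan3, String.toList_ofList]
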